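-- pv_equiv track=rewrite | github.com/santoshkosgi/Programming | Leetcode/suffixarray.py | compute_newrank
-- ===== SOURCE A (Python) =====
-- def compute_newrank(sorted_suffixes_index, rank1, rank2):
--     """
--     This method computes new rank, starting with zero. If elements at two consecutive indices of rank1 and rank2
--     are same, they get same rank. Else, one more than the previous one. All this is in the context of suffix arrays
--     @param rank1:
--     @param rank2:
--     @return:
--     """
--     new_rank = {}
--     rank = 0
--     first_entry = True
--     for suffix_index in sorted_suffixes_index:
--         if first_entry is True:
--             first_entry = False
--             new_rank[suffix_index] = rank
--             prev_rank1 = rank1[suffix_index]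
--             prev_rank2 = rank2[suffix_index]
--             continue
--         curr_rank1 = rank1[suffix_index]
--         curr_rank2 = rank2[suffix_index]
--         if prev_rank1 != curr_rank1 or prev_rank2 != curr_rank2:
--             rank += 1
--             new_rank[suffix_index] = rank
--             prev_rank1, prev_rank2 = curr_rank1, curr_rank2
--         else:
--             new_rank[suffix_index] = rank
--
--     return new_rank
-- ===== SOURCE B (Python) =====
-- def compute_newrank(sorted_suffixes_index, rank1, rank2):
--     pairs = [(rank1[s], rank2[s]) for s in sorted_suffixes_index]
--     out = {}
--     r = 0
--     idx = sorted_suffixes_index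
--     while pairs:
--         # length of the maximal leading run of pairs equal to pairs[0]
--         k = 1
--         while k < len(pairs) and pairs[k] == pairs[0]:
--             k += 1
--         for s in idx[:k]:
--             out[s] = r
--         idx, pairs = idx[k:], pairs[k:]
--         r += 1
--     return out
-- ===== Notes on version B (the rewrite author's own statement) =====
-- stated objective: alternative
-- what changed: B replaces A's single pass with prev-variable state by run-length segmentation: it materializes the projected pair list, then repeatedly peels off the maximal leading run of equal pairs and assigns each whole run one rank (the run index).
import Mathlib
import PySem

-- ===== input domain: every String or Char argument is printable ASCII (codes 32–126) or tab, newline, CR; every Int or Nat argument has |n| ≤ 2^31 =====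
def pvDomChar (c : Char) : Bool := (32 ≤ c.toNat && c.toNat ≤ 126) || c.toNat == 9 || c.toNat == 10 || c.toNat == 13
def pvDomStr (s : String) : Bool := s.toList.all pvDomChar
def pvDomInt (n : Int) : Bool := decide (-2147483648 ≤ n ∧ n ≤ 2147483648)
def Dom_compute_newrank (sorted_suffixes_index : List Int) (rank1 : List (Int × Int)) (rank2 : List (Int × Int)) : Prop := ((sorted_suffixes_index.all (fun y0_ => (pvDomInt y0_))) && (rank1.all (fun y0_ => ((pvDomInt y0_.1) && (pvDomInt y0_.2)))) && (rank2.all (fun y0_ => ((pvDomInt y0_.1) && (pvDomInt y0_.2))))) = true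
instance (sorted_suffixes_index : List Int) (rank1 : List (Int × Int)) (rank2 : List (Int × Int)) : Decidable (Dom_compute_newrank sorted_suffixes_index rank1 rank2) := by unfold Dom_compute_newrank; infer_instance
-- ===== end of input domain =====

-- B replaces A's single pass with prev-variable state by run-length segmentation over the
-- materialized pair list (objective: alternative). A = B on Pre_ (every listed suffix index
-- is a key of both rank dicts; elsewhere both Pythons raise KeyError).

-- ===== PORT A =====
-- A's loop: state = (dict built so far, current rank, (prev_rank1, prev_rank2));
-- a failing dict lookup is Python's KeyError — excluded by Pre_, here the loop stops.
def goA (rank1 : PySem.Dict Int Int) (rank2 : PySem.Dict Int Int)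
    (d : PySem.Dict Int Int) (rank : Int) (prev : Int × Int) : List Int → PySem.Dict Int Int
  | [] => d
  | s :: rest =>
    match rank1.get? s, rank2.get? s with
    | some c1, some c2 =>
      if prev.1 ≠ c1 ∨ prev.2 ≠ c2 then
        goA rank1 rank2 (d.insert s (rank + 1)) (rank + 1) (c1, c2) rest
      else
        goA rank1 rank2 (d.insert s rank) rank prev rest
    | _, _ => d  -- KeyError (outside Pre_)

def compute_newrank (sorted_suffixes_index : List Int) (rank1 : List (Int × Int)) (rank2 : List (Int × Int)) : List (Int × Int) :=
  let r1 : PySem.Dict Int Int := PySem.Dict.ofList rank1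
  let r2 : PySem.Dict Int Int := PySem.Dict.ofList rank2
  match sorted_suffixes_index with
  | [] => []
  | s :: rest =>
    match r1.get? s, r2.get? s with
    | some p1, some p2 =>
      (goA r1 r2 (PySem.Dict.empty.insert s 0) 0 (p1, p2) rest).items
    | _, _ => []  -- KeyError (outside Pre_)

-- ===== PORT B =====
-- length of the maximal leading run of pairs equal to p (the inner `while` of Source B;
-- run length k of Source B is countEq pairs[0] pairs[1:] + 1)
def countEq (p : Option Int × Option Int) : List (Option Int × Option Int) → Nat
  | [] => 0
  | q :: qs => if q = p then countEq p qs + 1 else 0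

-- B's outer `while pairs:` loop: peel off the maximal leading run, insert its indices with
-- rank r, continue with the tails at rank r+1.
def bLoop (idx : List Int) (pairs : List (Option Int × Option Int))
    (out : PySem.Dict Int Int) (r : Int) : PySem.Dict Int Int :=
  match pairs with
  | [] => out
  | p :: ps =>
    let c := countEq p ps          -- run length k = c + 1
    bLoop (idx.drop (c + 1)) (ps.drop c)
      ((idx.take (c + 1)).foldl (fun d s => d.insert s r) out) (r + 1)
termination_by pairs.length
decreasing_by simp [List.length_drop]

def compute_newrank_alt (sorted_suffixes_index : List Int) (rank1 : List (Int × Int)) (rank2 : List (Int × Int)) : List (Int × Int) :=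
  let r1 : PySem.Dict Int Int := PySem.Dict.ofList rank1
  let r2 : PySem.Dict Int Int := PySem.Dict.ofList rank2
  -- pairs = [(rank1[s], rank2[s]) for s in sorted_suffixes_index]  (none = KeyError, outside Pre_)
  let pairs := sorted_suffixes_index.map (fun s => (r1.get? s, r2.get? s))
  (bLoop sorted_suffixes_index pairs PySem.Dict.empty 0).items

-- ===== PRECONDITION & SPEC =====
-- Pre_ excludes exactly the inputs on which both Pythons raise KeyError: some listed
-- suffix index is missing from rank1 or rank2.
def Pre_compute_newrank (sorted_suffixes_index : List Int) (rank1 : List (Int × Int)) (rank2 : List (Int × Int)) : Prop :=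
  ∀ s ∈ sorted_suffixes_index,
    ((PySem.Dict.ofList rank1).get? s).isSome = true ∧ ((PySem.Dict.ofList rank2).get? s).isSome = true
instance (sorted_suffixes_index : List Int) (rank1 : List (Int × Int)) (rank2 : List (Int × Int)) : Decidable (Pre_compute_newrank sorted_suffixes_index rank1 rank2) := by unfold Pre_compute_newrank; infer_instance

def pvWitness_compute_newrank : List Int × (List (Int × Int)) × (List (Int × Int)) :=
  ([1, 0, 2], [(0, 1), (1, 0), (2, 1)], [(0, 0), (1, 2), (2, 0)])

def Spec_compute_newrank (sorted_suffixes_index : List Int) (rank1 : List (Int × Int)) (rank2 : List (Int × Int)) (out : List (Int × Int)) : Prop := out = compute_newrank_alt sorted_suffixes_index rank1 rank2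
instance (sorted_suffixes_index : List Int) (rank1 : List (Int × Int)) (rank2 : List (Int × Int)) (out : List (Int × Int)) : Decidable (Spec_compute_newrank sorted_suffixes_index rank1 rank2 out) := by unfold Spec_compute_newrank; infer_instance

-- ===== CLAIM (what is proved, stated in full; the proofs are below) =====
def Claim_equal_compute_newrank : Prop := ∀ (sorted_suffixes_index : List Int) (rank1 : List (Int × Int)) (rank2 : List (Int × Int)), Dom_compute_newrank sorted_suffixes_index rank1 rank2 → Pre_compute_newrank sorted_suffixes_index rank1 rank2 → Spec_compute_newrank sorted_suffixes_index rank1 rank2 (compute_newrank sorted_suffixes_index rank1 rank2)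

-- ===== LEMMAS AND PROOFS =====

-- A's loop mid-run: with prev pair p and rank r, exactly the countEq leading elements whose
-- pair equals prev get rank r, and the remainder is a fresh bLoop run at rank r+1.
theorem goA_eq_bLoop (r1 r2 : PySem.Dict Int Int) (rest : List Int)
    (hpre : ∀ s ∈ rest, (r1.get? s).isSome = true ∧ (r2.get? s).isSome = true)
    (d : PySem.Dict Int Int) (r : Int) (p1 p2 : Int) :
    goA r1 r2 d r (p1, p2) rest =
      bLoop (rest.drop (countEq (some p1, some p2) (rest.map (fun s => (r1.get? s, r2.get? s)))))
        ((rest.drop (countEq (some p1, some p2) (rest.map (fun s => (r1.get? s, r2.get? s))))).map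
          (fun s => (r1.get? s, r2.get? s)))
        ((rest.take (countEq (some p1, some p2) (rest.map (fun s => (r1.get? s, r2.get? s))))).foldl
          (fun d s => d.insert s r) d) (r + 1) := by
  induction rest generalizing d r p1 p2 with
  | nil => rw [bLoop.eq_def]; simp [goA, countEq]
  | cons s rest ih =>
    obtain ⟨h1, h2⟩ := hpre s (List.mem_cons_self ..)
    obtain ⟨c1, hc1⟩ := Option.isSome_iff_exists.mp h1
    obtain ⟨c2, hc2⟩ := Option.isSome_iff_exists.mp h2
    have hpre' : ∀ t ∈ rest, (r1.get? t).isSome = true ∧ (r2.get? t).isSome = true :=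
      fun t ht => hpre t (List.mem_cons_of_mem _ ht)
    by_cases heq : ((some c1, some c2) : Option Int × Option Int) = (some p1, some p2)
    · -- s continues the current run
      have hc1' : r1.get? s = some p1 := by
        rw [hc1, Option.some.inj (congrArg Prod.fst heq)]
      have hc2' : r2.get? s = some p2 := by
        rw [hc2, Option.some.inj (congrArg Prod.snd heq)]
      simp only [goA, hc1', hc2', List.map_cons, countEq]
      rw [if_neg (by simp)]
      simpa [List.drop_succ_cons, List.take_succ_cons] using ih hpre' (d.insert s r) r p1 p2
    · -- s starts a new run
      have hne : p1 ≠ c1 ∨ p2 ≠ c2 := by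
        by_contra h; push Not at h; exact heq (by rw [h.1, h.2])
      simp only [goA, hc1, hc2, List.map_cons, countEq, if_neg heq, if_pos hne]
      rw [List.drop_zero, List.take_zero]
      -- unfold one step of bLoop on the new run s :: rest
      rw [bLoop.eq_def]
      simp only [List.map_cons, List.foldl_nil, hc1, hc2, List.drop_succ_cons,
        List.take_succ_cons, List.foldl_cons]
      rw [ih hpre' (d.insert s (r + 1)) (r + 1) c1 c2, List.map_drop]

-- ===== VERDICT (by name: the statement is the Claim_ definition above) =====
theorem compute_newrank_spec : Claim_equal_compute_newrank := by
  intro xs rank1 rank2 _hdom hpre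
  unfold Spec_compute_newrank compute_newrank compute_newrank_alt
  cases xs with
  | nil => simp [bLoop.eq_def, PySem.Dict.empty]
  | cons s rest =>
    obtain ⟨h1, h2⟩ := hpre s (List.mem_cons_self ..)
    obtain ⟨p1, hp1⟩ := Option.isSome_iff_exists.mp h1
    obtain ⟨p2, hp2⟩ := Option.isSome_iff_exists.mp h2
    have hpre' : ∀ t ∈ rest,
        ((PySem.Dict.ofList rank1).get? t).isSome = true ∧
        ((PySem.Dict.ofList rank2).get? t).isSome = true :=
      fun t ht => hpre t (List.mem_cons_of_mem _ ht)
    simp only [hp1, hp2, List.map_cons]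
    rw [bLoop.eq_def]
    simp only [List.drop_succ_cons, List.take_succ_cons, List.foldl_cons]
    rw [goA_eq_bLoop _ _ _ hpre', List.map_drop]
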